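-- pv_equiv track=rewrite | github.com/MrBrantCode/unitest_baseline | mut_generate/mist_train_taco/taco_7016/solution.py | find_next_same_calendar_year
-- ===== SOURCE A (Python) =====
-- def find_next_same_calendar_year(y: int) -> int:
--     def isleap(year: int) -> bool:
--         if year % 400 == 0:
--             return True
--         elif year % 4 == 0 and year % 100 != 0:
--             return True
--         else:
--             return False
--
--     x = 0
--     ans = y
--
--     while True:
--         if isleap(y):
--             x += 2
--         else:
--             x += 1
--         x %= 7
--         y += 1
--         if x == 0 and isleap(y) == isleap(ans):
--             break
--
--     return y
-- ===== SOURCE B (Python) =====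
-- def find_next_same_calendar_year(y: int) -> int:
--     def isleap(year: int) -> bool:
--         if year % 400 == 0:
--             return True
--         elif year % 4 == 0 and year % 100 != 0:
--             return True
--         else:
--             return False
--
--     def weekday(Y: int) -> int:
--         # day of week of Jan 1 of year Y (closed form, proleptic Gregorian)
--         Z = Y - 1
--         return (365 * Z + Z // 4 - Z // 100 + Z // 400) % 7
--
--     w0 = weekday(y)
--     L0 = isleap(y)
--     c = y
--     while True:
--         c += 1
--         if weekday(c) == w0 and isleap(c) == L0:
--             return c
-- ===== Notes on version B (the rewrite author's own statement) =====
-- stated objective: alternative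
-- what changed: B replaces A's incremental mod-seven day accumulator with a closed-form weekday-of-Jan-first helper computed per candidate year, returning the first later year with the same weekday and same leapness.
import Mathlib
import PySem

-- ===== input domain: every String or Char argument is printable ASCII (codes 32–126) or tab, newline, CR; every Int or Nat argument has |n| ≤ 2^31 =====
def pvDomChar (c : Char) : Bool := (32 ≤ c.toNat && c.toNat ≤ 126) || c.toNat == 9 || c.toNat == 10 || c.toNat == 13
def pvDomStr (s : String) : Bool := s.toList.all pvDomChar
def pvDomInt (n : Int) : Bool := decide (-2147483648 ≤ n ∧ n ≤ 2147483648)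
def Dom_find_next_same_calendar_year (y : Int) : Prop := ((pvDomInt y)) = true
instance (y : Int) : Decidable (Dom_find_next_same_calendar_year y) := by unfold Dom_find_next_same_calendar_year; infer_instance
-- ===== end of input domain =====

-- B replaces A's incremental mod-7 day accumulator with a closed-form per-candidate
-- weekday computation; same cost class (objective: alternative).

-- ===== PORT A =====
-- shared helper: both Pythons define this identical nested `isleap`
def isleap (year : Int) : Bool :=
  if PySem.Int.mod year 400 = 0 then true
  else if PySem.Int.mod year 4 = 0 ∧ PySem.Int.mod year 100 ≠ 0 then true
  else false

-- A's `while True` loop; fuel 500 only makes it total (the Python loop always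
-- breaks within 400 iterations, since the Gregorian calendar has period 400).
def loopA (ans : Int) : Nat → Int → Int → Int
  | 0, _, y => y
  | n+1, x, y =>
    let x' := PySem.Int.mod (x + (if isleap y then 2 else 1)) 7
    let y' := y + 1
    if x' = 0 ∧ isleap y' = isleap ans then y' else loopA ans n x' y'

def find_next_same_calendar_year (y : Int) : Int := loopA y 500 0 y

-- ===== PORT B =====
-- closed-form day-of-week of Jan 1 of year Y
def wday (Y : Int) : Int :=
  let Z := Y - 1
  PySem.Int.mod (365 * Z + PySem.Int.floordiv Z 4 - PySem.Int.floordiv Z 100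
                 + PySem.Int.floordiv Z 400) 7

-- B's `while True` loop; same fuel-500 totality guard
def loopB (w0 : Int) (L0 : Bool) : Nat → Int → Int
  | 0, c => c
  | n+1, c =>
    let c' := c + 1
    if wday c' = w0 ∧ isleap c' = L0 then c' else loopB w0 L0 n c'

def find_next_same_calendar_year_alt (y : Int) : Int := loopB (wday y) (isleap y) 500 y

-- ===== PRECONDITION & SPEC =====
def Spec_find_next_same_calendar_year (y : Int) (out : Int) : Prop := out = find_next_same_calendar_year_alt y
instance (y : Int) (out : Int) : Decidable (Spec_find_next_same_calendar_year y out) := by unfold Spec_find_next_same_calendar_year; infer_instance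

-- ===== CLAIM (what is proved, stated in full; the proofs are below) =====
def Claim_equal_find_next_same_calendar_year : Prop := ∀ (y : Int), Dom_find_next_same_calendar_year y → Spec_find_next_same_calendar_year y (find_next_same_calendar_year y)

-- ===== LEMMAS AND PROOFS =====

-- the un-modded day count behind `wday` (Euclidean `/` = Python `//` for positive divisors)
def Wraw (y : Int) : Int := 365 * (y - 1) + (y - 1) / 4 - (y - 1) / 100 + (y - 1) / 400

theorem wday_eq (Y : Int) : wday Y = Wraw Y % 7 := by
  unfold wday Wraw
  simp only []
  rw [PySem.Int.floordiv_eq_ediv_of_pos (by norm_num : (0:Int) < 4),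
      PySem.Int.floordiv_eq_ediv_of_pos (by norm_num : (0:Int) < 100),
      PySem.Int.floordiv_eq_ediv_of_pos (by norm_num : (0:Int) < 400),
      PySem.Int.mod_eq_emod_of_pos (by norm_num : (0:Int) < 7)]

theorem isleap_eq (y : Int) :
    isleap y = decide (y % 400 = 0 ∨ (y % 4 = 0 ∧ y % 100 ≠ 0)) := by
  unfold isleap
  rw [PySem.Int.mod_eq_emod_of_pos (by norm_num : (0:Int) < 400),
      PySem.Int.mod_eq_emod_of_pos (by norm_num : (0:Int) < 4),
      PySem.Int.mod_eq_emod_of_pos (by norm_num : (0:Int) < 100)]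
  by_cases h4 : y % 400 = 0 <;> by_cases h1 : y % 4 = 0 <;> by_cases h2 : y % 100 = 0 <;>
    simp [h4, h1, h2]

-- one step of A's accumulator equals the closed-form increment, mod 7
theorem Wraw_step (y : Int) :
    (Wraw (y + 1)) % 7 = (Wraw y + (if isleap y then 2 else 1)) % 7 := by
  rw [isleap_eq]
  have key : Wraw (y + 1) = Wraw y + 365 + (if y % 4 = 0 then (1:Int) else 0)
      - (if y % 100 = 0 then (1:Int) else 0) + (if y % 400 = 0 then (1:Int) else 0) := by
    unfold Wraw
    simp only [add_sub_cancel_right]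
    by_cases h1 : y % 4 = 0 <;> by_cases h2 : y % 100 = 0 <;> by_cases h3 : y % 400 = 0 <;>
      simp [h1, h2, h3] <;> omega
  rw [key]
  simp only [decide_eq_true_eq]
  by_cases h1 : y % 4 = 0 <;> by_cases h2 : y % 100 = 0 <;> by_cases h3 : y % 400 = 0 <;>
    simp [h1, h2, h3] <;> omega

theorem loop_eq (ans : Int) : ∀ (n : Nat) (x y : Int),
    x = (Wraw y - Wraw ans) % 7 →
    loopA ans n x y = loopB (wday ans) (isleap ans) n y := by
  intro n
  induction n with
  | zero => intro x y _; rfl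
  | succ n ih =>
    intro x y hx
    simp only [loopA, loopB]
    have hx' : PySem.Int.mod (x + (if isleap y then 2 else 1)) 7
        = (Wraw (y + 1) - Wraw ans) % 7 := by
      rw [PySem.Int.mod_eq_emod_of_pos (by norm_num : (0:Int) < 7), hx]
      have hs := Wraw_step y
      cases hi : isleap y <;> simp only [hi, if_true, if_false, Bool.false_eq_true] at hs ⊢ <;> omega
    have hcond : (PySem.Int.mod (x + (if isleap y then 2 else 1)) 7 = 0)
        ↔ (wday (y + 1) = wday ans) := by
      rw [hx', wday_eq, wday_eq]
      omega
    by_cases hc : wday (y + 1) = wday ans ∧ isleap (y + 1) = isleap ans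
    · rw [if_pos ⟨hcond.mpr hc.1, hc.2⟩, if_pos hc]
    · rw [if_neg (fun h => hc ⟨hcond.mp h.1, h.2⟩), if_neg hc]
      exact ih _ _ hx'

-- ===== VERDICT (by name: the statement is the Claim_ definition above) =====
theorem find_next_same_calendar_year_spec : Claim_equal_find_next_same_calendar_year := by
  intro y _
  unfold Spec_find_next_same_calendar_year find_next_same_calendar_year find_next_same_calendar_year_alt
  exact loop_eq y 500 0 y (by omega)
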